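-- pv_equiv track=rewrite | github.com/nicoaira/CastRNA | bin/generate_msa_outputs.py | project_structure_aligned
-- ===== SOURCE A (Python) =====
-- OPENING_BRACKETS = '(<[{'
--
-- CLOSING_BRACKETS = ')>]}'
--
-- REVERSE_BRACKET_PAIRS = dict(zip(CLOSING_BRACKETS, OPENING_BRACKETS))
--
-- def normalize_ss_cons(ss_cons: str) -> str:
--     """Normalize SS_cons notation to standard dot-bracket."""
--     result = []
--     for char in ss_cons:
--         if char in OPENING_BRACKETS or char in CLOSING_BRACKETS:
--             result.append(char)
--         elif char == '.':
--             result.append('.')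
--         elif char in '_-:,~':
--             result.append('.')
--         elif char.isalpha():
--             result.append(char)
--         else:
--             result.append('.')
--     return ''.join(result)
--
-- def find_pairs(structure: str) -> dict[int, int]:
--     """Find base pair positions in bracket notation."""
--     pairs = {}
--     stacks = {bracket: [] for bracket in OPENING_BRACKETS}
--     letter_stacks = {chr(c): [] for c in range(ord('A'), ord('Z') + 1)}
--
--     for i, char in enumerate(structure):
--         if char in OPENING_BRACKETS:
--             stacks[char].append(i)
--         elif char in CLOSING_BRACKETS:
--             opening = REVERSE_BRACKET_PAIRS[char]
--             if stacks[opening]: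
--                 j = stacks[opening].pop()
--                 pairs[i] = j
--                 pairs[j] = i
--         elif char.isupper():
--             letter_stacks[char].append(i)
--         elif char.islower():
--             upper = char.upper()
--             if letter_stacks[upper]:
--                 j = letter_stacks[upper].pop()
--                 pairs[i] = j
--                 pairs[j] = i
--
--     return pairs
--
-- def project_structure_aligned(aligned_seq: str, ss_cons: str) -> str:
--     """
--     Project consensus structure onto aligned sequence, keeping alignment gaps.
--
--     Returns structure string with same length as aligned_seq, where:
--     - Positions with residues get projected structure
--     - Gap positions get '-' (to distinguish from '.' which means unpaired)
--     """
--     ss_cons = normalize_ss_cons(ss_cons)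
--     aln_pairs = find_pairs(ss_cons)
--
--     projected = []
--     for aln_col, (seq_char, ss_char) in enumerate(zip(aligned_seq, ss_cons)):
--         if seq_char in '.-':
--             # Gap in sequence - use '-' in structure (no nucleotide = no structure)
--             projected.append('-')
--         elif seq_char.islower():
--             # Insertion state - unpaired
--             projected.append('.')
--         else:
--             # Match state - check if pair is intact
--             if aln_col in aln_pairs:
--                 partner_col = aln_pairs[aln_col]
--                 partner_char = aligned_seq[partner_col] if partner_col < len(aligned_seq) else '-'
--                 if partner_char in '.-':
--                     # Partner is deleted - break pair
--                     projected.append('.')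
--                 else:
--                     projected.append(ss_char)
--             else:
--                 projected.append(ss_char)
--
--     return ''.join(projected)
-- ===== SOURCE B (Python) =====
-- OPENING_BRACKETS = '(<[{'
--
-- CLOSING_BRACKETS = ')>]}'
--
-- REVERSE_BRACKET_PAIRS = dict(zip(CLOSING_BRACKETS, OPENING_BRACKETS))
--
-- def normalize_ss_cons(ss_cons: str) -> str:
--     """Normalize SS_cons notation to standard dot-bracket."""
--     result = []
--     for char in ss_cons:
--         if char in OPENING_BRACKETS or char in CLOSING_BRACKETS:
--             result.append(char)
--         elif char == '.':
--             result.append('.')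
--         elif char in '_-:,~':
--             result.append('.')
--         elif char.isalpha():
--             result.append(char)
--         else:
--             result.append('.')
--     return ''.join(result)
--
-- def find_pairs(structure: str) -> dict[int, int]:
--     """Find base pair positions in bracket notation."""
--     pairs = {}
--     stacks = {bracket: [] for bracket in OPENING_BRACKETS}
--     letter_stacks = {chr(c): [] for c in range(ord('A'), ord('Z') + 1)}
--
--     for i, char in enumerate(structure):
--         if char in OPENING_BRACKETS:
--             stacks[char].append(i)
--         elif char in CLOSING_BRACKETS:
--             opening = REVERSE_BRACKET_PAIRS[char]
--             if stacks[opening]: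
--                 j = stacks[opening].pop()
--                 pairs[i] = j
--                 pairs[j] = i
--         elif char.isupper():
--             letter_stacks[char].append(i)
--         elif char.islower():
--             upper = char.upper()
--             if letter_stacks[upper]:
--                 j = letter_stacks[upper].pop()
--                 pairs[i] = j
--                 pairs[j] = i
--
--     return pairs
--
-- def _pair_broken(seq: str, n: int, i: int, j: int) -> bool:
--     """Is column i a match state (within the projected range) whose partner j is deleted?"""
--     if i >= n:
--         return False
--     c = seq[i]
--     if c in '.-' or c.islower():
--         return False
--     partner = seq[j] if j < len(seq) else '-'
--     return partner in '.-'
--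
-- def project_structure_aligned(aligned_seq: str, ss_cons: str) -> str:
--     """Two-pass version: project each column, then break deleted pairs in place."""
--     ss = normalize_ss_cons(ss_cons)
--     pairs = find_pairs(ss)
--     n = min(len(aligned_seq), len(ss))
--     proj = []
--     for i in range(n):
--         c = aligned_seq[i]
--         proj.append('-' if c in '.-' else '.' if c.islower() else ss[i])
--     for i, j in pairs.items():
--         if _pair_broken(aligned_seq, n, i, j):
--             proj[i] = '.'
--     return ''.join(proj)
-- ===== Notes on version B (the rewrite author's own statement) =====
-- stated objective: alternative
-- what changed: Replaces A's single pass with a per-column pair lookup by a two-pass scheme: first project every column by its own character only, then iterate over the base-pair map once and rewrite in place the match-state endpoints whose partner is deleted.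
import Mathlib
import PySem

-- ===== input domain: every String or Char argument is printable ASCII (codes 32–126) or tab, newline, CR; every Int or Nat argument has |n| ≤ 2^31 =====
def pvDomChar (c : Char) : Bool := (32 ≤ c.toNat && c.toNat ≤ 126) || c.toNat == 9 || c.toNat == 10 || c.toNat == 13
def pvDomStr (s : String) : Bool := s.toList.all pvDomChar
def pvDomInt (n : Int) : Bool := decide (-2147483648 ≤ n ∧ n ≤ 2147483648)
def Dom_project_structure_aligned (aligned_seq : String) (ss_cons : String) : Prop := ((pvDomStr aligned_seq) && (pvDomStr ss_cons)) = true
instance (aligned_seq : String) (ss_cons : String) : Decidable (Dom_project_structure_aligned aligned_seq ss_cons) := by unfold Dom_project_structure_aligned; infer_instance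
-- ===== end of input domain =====

-- B replaces A's single pass (per-column pair lookup) by a two-pass scheme: project each
-- column from its own character, then one sweep over the pair map breaking deleted pairs
-- in place (objective: alternative decomposition, same cost).

-- ===== PORT A =====
-- OPENING_BRACKETS / CLOSING_BRACKETS / REVERSE_BRACKET_PAIRS
def pvOpenB : List Char := ['(', '<', '[', '{']
def pvCloseB : List Char := [')', '>', ']', '}']
def pvRevB : PySem.Dict Char Char := PySem.Dict.ofList (pvCloseB.zip pvOpenB)

-- normalize_ss_cons (per-char loop appending one char per iteration → map)
def normalizeSS (cs : List Char) : List Char :=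
  cs.map (fun c =>
    if c ∈ pvOpenB ∨ c ∈ pvCloseB then c
    else if c = '.' then '.'
    else if c ∈ ['_', '-', ':', ',', '~'] then '.'
    else if PySem.Chars.isalpha c then c
    else '.')

-- one iteration of find_pairs' loop; state st = (pairs, stacks, letter_stacks).
-- Python pre-seeds stacks/letter_stacks with [] at every possible key; `stacks[c]` is
-- therefore `getD c []` here (exact: guards ensure only those keys are ever read).
-- `list.pop()` (pop last) = getLast? / dropLast.
def fpStep (st : PySem.Dict Int Int × PySem.Dict Char (List Int) × PySem.Dict Char (List Int))
    (p : Int × Char) :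
    PySem.Dict Int Int × PySem.Dict Char (List Int) × PySem.Dict Char (List Int) :=
  if p.2 ∈ pvOpenB then
    (st.1, st.2.1.insert p.2 (st.2.1.getD p.2 [] ++ [p.1]), st.2.2)
  else if p.2 ∈ pvCloseB then
    match (st.2.1.getD (pvRevB.getD p.2 ' ') []).getLast? with
    | some j => ((st.1.insert p.1 j).insert j p.1,
                 st.2.1.insert (pvRevB.getD p.2 ' ') (st.2.1.getD (pvRevB.getD p.2 ' ') []).dropLast,
                 st.2.2)
    | none => st
  else if PySem.Chars.isupper p.2 then
    (st.1, st.2.1, st.2.2.insert p.2 (st.2.2.getD p.2 [] ++ [p.1]))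
  else if PySem.Chars.islower p.2 then
    match (st.2.2.getD (PySem.Chars.upperChar p.2) []).getLast? with
    | some j => ((st.1.insert p.1 j).insert j p.1,
                 st.2.1,
                 st.2.2.insert (PySem.Chars.upperChar p.2) (st.2.2.getD (PySem.Chars.upperChar p.2) []).dropLast)
    | none => st
  else st

-- find_pairs
def findPairs (structure_ : List Char) : PySem.Dict Int Int :=
  ((PySem.List.enumerate structure_ 0).foldl fpStep
    (PySem.Dict.empty, PySem.Dict.empty, PySem.Dict.empty)).1

-- body of A's projection loop, one column p = (aln_col, (seq_char, ss_char)).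
-- aln_pairs keys are nonnegative, so `seq.getD partnerCol.toNat` under the
-- `partnerCol < len` guard is exactly Python's aligned_seq[partner_col].
def projectCol (seq : List Char) (alnPairs : PySem.Dict Int Int) (p : Int × Char × Char) : Char :=
  if p.2.1 == '.' || p.2.1 == '-' then '-'
  else if PySem.Chars.islower p.2.1 then '.'
  else if alnPairs.contains p.1 then
    (if (if alnPairs.getD p.1 0 < (seq.length : Int) then seq.getD (alnPairs.getD p.1 0).toNat ' ' else '-') == '.'
        || (if alnPairs.getD p.1 0 < (seq.length : Int) then seq.getD (alnPairs.getD p.1 0).toNat ' ' else '-') == '-'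
     then '.' else p.2.2)
  else p.2.2

def project_structure_aligned (aligned_seq : String) (ss_cons : String) : String :=
  String.mk ((PySem.List.enumerate (aligned_seq.toList.zip (normalizeSS ss_cons.toList)) 0).map
    (projectCol aligned_seq.toList (findPairs (normalizeSS ss_cons.toList))))

-- ===== PORT B =====
-- _pair_broken (pair keys i, j are nonnegative, so `.toNat` under the range guards
-- is exactly Python's seq[i] / seq[j])
def pairBroken (seq : List Char) (n : Nat) (i j : Int) : Bool :=
  if (n : Int) ≤ i then false
  else if (seq.getD i.toNat ' ' == '.' || seq.getD i.toNat ' ' == '-')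
          || PySem.Chars.islower (seq.getD i.toNat ' ') then false
  else (if j < (seq.length : Int) then seq.getD j.toNat ' ' else '-') == '.'
       || (if j < (seq.length : Int) then seq.getD j.toNat ' ' else '-') == '-'

-- first pass: project column i from its own character only
def projBase (seq ssl : List Char) (n : Nat) : List Char :=
  (List.range n).map (fun i =>
    if seq.getD i ' ' == '.' || seq.getD i ' ' == '-' then '-'
    else if PySem.Chars.islower (seq.getD i ' ') then '.'
    else ssl.getD i ' ')

def project_structure_aligned_alt (aligned_seq : String) (ss_cons : String) : String :=
  String.mk ((findPairs (normalizeSS ss_cons.toList)).items.foldl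
    (fun pr e =>
      if pairBroken aligned_seq.toList (min aligned_seq.toList.length (normalizeSS ss_cons.toList).length) e.1 e.2
      then pr.set e.1.toNat '.' else pr)
    (projBase aligned_seq.toList (normalizeSS ss_cons.toList)
      (min aligned_seq.toList.length (normalizeSS ss_cons.toList).length)))

-- ===== PRECONDITION & SPEC =====
def Spec_project_structure_aligned (aligned_seq : String) (ss_cons : String) (out : String) : Prop := out = project_structure_aligned_alt aligned_seq ss_cons
instance (aligned_seq : String) (ss_cons : String) (out : String) : Decidable (Spec_project_structure_aligned aligned_seq ss_cons out) := by unfold Spec_project_structure_aligned; infer_instance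

-- ===== CLAIM (what is proved, stated in full; the proofs are below) =====
def Claim_equal_project_structure_aligned : Prop := ∀ (aligned_seq : String) (ss_cons : String), Dom_project_structure_aligned aligned_seq ss_cons → Spec_project_structure_aligned aligned_seq ss_cons (project_structure_aligned aligned_seq ss_cons)

-- ===== LEMMAS AND PROOFS =====

-- getD after set
theorem pvGetD_set (l : List Char) (i j : Nat) (a d : Char) :
    (l.set i a).getD j d = if i = j ∧ j < l.length then a else l.getD j d := by
  rw [List.getD_eq_getElem?_getD, List.getD_eq_getElem?_getD, List.getElem?_set]
  by_cases hij : i = j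
  · subst hij
    by_cases hl : i < l.length
    · simp [hl]
    · simp [hl]
  · simp [hij]

-- the patch fold preserves length
theorem pvPatch_length (seq : List Char) (n : Nat) :
    ∀ (l : List (Int × Int)) (pr : List Char),
      (l.foldl (fun pr e => if pairBroken seq n e.1 e.2 then pr.set e.1.toNat '.' else pr)
        pr).length = pr.length := by
  intro l
  induction l with
  | nil => intro pr; rfl
  | cons e t ih =>
    intro pr
    simp only [List.foldl_cons]
    by_cases h : pairBroken seq n e.1 e.2
    · rw [if_pos h, ih, List.length_set]
    · rw [if_neg h, ih]

-- element k after the patch fold: '.' if some pair entry rewrites column k, else unchanged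
theorem pvPatch_getD (seq : List Char) (n : Nat) :
    ∀ (l : List (Int × Int)) (pr : List Char) (k : Nat) (d : Char), k < pr.length →
      (l.foldl (fun pr e => if pairBroken seq n e.1 e.2 then pr.set e.1.toNat '.' else pr)
          pr).getD k d
        = if l.any (fun e => pairBroken seq n e.1 e.2 && (e.1.toNat == k)) then '.'
          else pr.getD k d := by
  intro l
  induction l with
  | nil => intro pr k d _; simp
  | cons e t ih =>
    intro pr k d hk
    simp only [List.foldl_cons, List.any_cons]
    by_cases h : pairBroken seq n e.1 e.2 = true
    · rw [if_pos h, ih _ _ _ (by simpa using hk)]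
      by_cases hek : e.1.toNat = k
      · have h2 : (pr.set e.1.toNat '.').getD k d = '.' := by
          rw [pvGetD_set]; simp [hek, hk]
        have h3 : (pairBroken seq n e.1 e.2 && (e.1.toNat == k)) = true := by simp [h, hek]
        rw [h2]; simp only [h3, Bool.true_or]; simp
      · have h2 : (pr.set e.1.toNat '.').getD k d = pr.getD k d := by
          rw [pvGetD_set]; simp [hek]
        have h3 : (pairBroken seq n e.1 e.2 && (e.1.toNat == k)) = false := by simp [hek]
        rw [h2]; simp only [h3, Bool.false_or]
    · rw [if_neg h, ih _ _ _ hk]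
      have h3 : (pairBroken seq n e.1 e.2 && (e.1.toNat == k)) = false := by
        simp [Bool.eq_false_iff.2 h]
      simp only [h3, Bool.false_or]

-- invariant carried through find_pairs' loop
def pvGoodPairs (P : PySem.Dict Int Int) : Prop :=
  P.keys.Nodup ∧ ∀ k ∈ P.keys, 0 ≤ k

def pvGoodStacks (S : PySem.Dict Char (List Int)) : Prop :=
  ∀ c : Char, ∀ x ∈ S.getD c [], 0 ≤ x

def pvGoodSt (st : PySem.Dict Int Int × PySem.Dict Char (List Int) × PySem.Dict Char (List Int)) : Prop :=
  pvGoodPairs st.1 ∧ pvGoodStacks st.2.1 ∧ pvGoodStacks st.2.2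

theorem pvGoodPairs_insert2 (P : PySem.Dict Int Int) (i j : Int)
    (h : pvGoodPairs P) (hi : 0 ≤ i) (hj : 0 ≤ j) : pvGoodPairs ((P.insert i j).insert j i) := by
  obtain ⟨hnd, hpos⟩ := h
  refine ⟨PySem.Dict.nodup_keys_insert _ _ _ (PySem.Dict.nodup_keys_insert _ _ _ hnd), ?_⟩
  intro k hk
  rw [PySem.Dict.mem_keys_insert] at hk
  rcases hk with rfl | hk
  · exact hj
  · rw [PySem.Dict.mem_keys_insert] at hk
    rcases hk with rfl | hk
    · exact hi
    · exact hpos k hk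

theorem pvGoodStacks_insert (S : PySem.Dict Char (List Int)) (c : Char) (v : List Int)
    (h : pvGoodStacks S) (hv : ∀ x ∈ v, 0 ≤ x) : pvGoodStacks (S.insert c v) := by
  intro c' x hx
  rw [PySem.Dict.getD_insert] at hx
  by_cases hc : c' = c
  · rw [if_pos hc] at hx; exact hv x hx
  · rw [if_neg hc] at hx; exact h c' x hx

theorem pvAppend_nonneg (S : PySem.Dict Char (List Int)) (hS : pvGoodStacks S) (c : Char)
    (i : Int) (hi : 0 ≤ i) : ∀ x ∈ S.getD c [] ++ [i], 0 ≤ x := by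
  intro x hx
  rcases List.mem_append.1 hx with hx | hx
  · exact hS c x hx
  · simp at hx; omega

theorem pvFpStep_good (st : PySem.Dict Int Int × PySem.Dict Char (List Int) × PySem.Dict Char (List Int))
    (p : Int × Char) (hp : 0 ≤ p.1) (h : pvGoodSt st) : pvGoodSt (fpStep st p) := by
  obtain ⟨hP, hS, hL⟩ := h
  unfold fpStep
  by_cases h1 : p.2 ∈ pvOpenB
  · rw [if_pos h1]
    exact ⟨hP, pvGoodStacks_insert _ _ _ hS (pvAppend_nonneg _ hS _ _ hp), hL⟩
  · rw [if_neg h1]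
    by_cases h2 : p.2 ∈ pvCloseB
    · rw [if_pos h2]
      rcases hlast : (st.2.1.getD (pvRevB.getD p.2 ' ') []).getLast? with _ | j
      · exact ⟨hP, hS, hL⟩
      · have hj : 0 ≤ j := hS _ j (List.mem_of_getLast? hlast)
        refine ⟨pvGoodPairs_insert2 _ _ _ hP hp hj, ?_, hL⟩
        exact pvGoodStacks_insert _ _ _ hS
          (fun x hx => hS _ x (List.mem_of_mem_dropLast hx))
    · rw [if_neg h2]
      by_cases h3 : PySem.Chars.isupper p.2
      · rw [if_pos h3]
        exact ⟨hP, hS, pvGoodStacks_insert _ _ _ hL (pvAppend_nonneg _ hL _ _ hp)⟩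
      · rw [if_neg h3]
        by_cases h4 : PySem.Chars.islower p.2
        · rw [if_pos h4]
          rcases hlast : (st.2.2.getD (PySem.Chars.upperChar p.2) []).getLast? with _ | j
          · exact ⟨hP, hS, hL⟩
          · have hj : 0 ≤ j := hL _ j (List.mem_of_getLast? hlast)
            refine ⟨pvGoodPairs_insert2 _ _ _ hP hp hj, hS, ?_⟩
            exact pvGoodStacks_insert _ _ _ hL
              (fun x hx => hL _ x (List.mem_of_mem_dropLast hx))
        · rw [if_neg h4]; exact ⟨hP, hS, hL⟩

theorem pvFoldl_fpStep_good :
    ∀ (l : List (Int × Char)) (st : PySem.Dict Int Int × PySem.Dict Char (List Int) × PySem.Dict Char (List Int)),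
      (∀ p ∈ l, 0 ≤ p.1) → pvGoodSt st → pvGoodSt (l.foldl fpStep st) := by
  intro l
  induction l with
  | nil => intro st _ h; exact h
  | cons p t ih =>
    intro st hl h
    exact ih _ (fun q hq => hl q (List.mem_cons_of_mem _ hq))
      (pvFpStep_good st p (hl p (List.mem_cons_self)) h)

theorem pvFindPairs_good (s : List Char) : pvGoodPairs (findPairs s) := by
  have h := pvFoldl_fpStep_good (PySem.List.enumerate s 0)
    (PySem.Dict.empty, PySem.Dict.empty, PySem.Dict.empty)
    (by
      intro p hp
      rw [PySem.List.mem_enumerate_iff] at hp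
      obtain ⟨k, hk, rfl⟩ := hp
      simp)
    (by
      refine ⟨⟨?_, ?_⟩, ?_, ?_⟩
      · exact PySem.Dict.nodup_keys_empty
      · intro k hk; simp [PySem.Dict.keys_empty] at hk
      · intro c x hx; simp [PySem.Dict.getD_empty] at hx
      · intro c x hx; simp [PySem.Dict.getD_empty] at hx)
  exact h.1

-- `any` over the pair dict's items ↔ a lookup at column k succeeds with a broken partner
theorem pvAny_items_iff (P : PySem.Dict Int Int) (hg : pvGoodPairs P)
    (seq : List Char) (n : Nat) (k : Nat) :
    (P.items.any (fun e => pairBroken seq n e.1 e.2 && (e.1.toNat == k))) = true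
      ↔ ∃ j, P.get? (k : Int) = some j ∧ pairBroken seq n (k : Int) j = true := by
  obtain ⟨hnd, hpos⟩ := hg
  constructor
  · intro h
    rw [List.any_eq_true] at h
    obtain ⟨e, he, hb⟩ := h
    rw [Bool.and_eq_true, beq_iff_eq] at hb
    have hkey : e.1 ∈ P.keys := by
      simp only [PySem.Dict.keys]
      exact List.mem_map.2 ⟨e, he, rfl⟩
    have h0 : 0 ≤ e.1 := hpos _ hkey
    have he1 : e.1 = (k : Int) := by omega
    refine ⟨e.2, ?_, ?_⟩
    · rw [← he1]
      exact PySem.Dict.get?_of_mem_items P (by simpa using he) hnd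
    · rw [← he1]; exact hb.1
  · rintro ⟨j, hg', hb⟩
    rw [List.any_eq_true]
    refine ⟨((k : Int), j), PySem.Dict.mem_items_of_get?_eq_some P hg', ?_⟩
    simp [hb]

-- the heart of the equivalence: A's single pass = B's base-then-patch, as lists
theorem pvMain (seq ssl : List Char) :
    (PySem.List.enumerate (seq.zip ssl) 0).map (projectCol seq (findPairs ssl))
      = (findPairs ssl).items.foldl
          (fun pr e =>
            if pairBroken seq (min seq.length ssl.length) e.1 e.2
            then pr.set e.1.toNat '.' else pr)
          (projBase seq ssl (min seq.length ssl.length)) := by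
  have hlen0 : (projBase seq ssl (min seq.length ssl.length)).length = min seq.length ssl.length := by
    simp [projBase]
  have hlenB : ((findPairs ssl).items.foldl
      (fun pr e =>
        if pairBroken seq (min seq.length ssl.length) e.1 e.2
        then pr.set e.1.toNat '.' else pr)
      (projBase seq ssl (min seq.length ssl.length))).length = min seq.length ssl.length := by
    rw [pvPatch_length, hlen0]
  apply List.ext_getElem
  · simp [hlenB]
  · intro k h1 h2
    have hk : k < min seq.length ssl.length := by rwa [hlenB] at h2
    have hks : k < seq.length := lt_of_lt_of_le hk (Nat.min_le_left _ _)
    have hkc : k < ssl.length := lt_of_lt_of_le hk (Nat.min_le_right _ _)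
    rw [List.getElem_map, PySem.List.getElem_enumerate, List.getElem_zip]
    rw [← List.getD_eq_getElem _ ' ' h2,
      pvPatch_getD seq (min seq.length ssl.length) _ _ _ _ (by rwa [hlen0])]
    have hbase : (projBase seq ssl (min seq.length ssl.length)).getD k ' ' =
        (if seq[k] == '.' || seq[k] == '-' then '-'
         else if PySem.Chars.islower seq[k] then '.'
         else ssl[k]) := by
      rw [List.getD_eq_getElem _ ' ' (by rwa [hlen0])]
      unfold projBase
      rw [List.getElem_map, List.getElem_range]
      rw [List.getD_eq_getElem seq ' ' hks, List.getD_eq_getElem ssl ' ' hkc]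
    rw [hbase]
    -- evaluate pairBroken at column k
    have hbk : ∀ j : Int, pairBroken seq (min seq.length ssl.length) (k : Int) j =
        (!(seq[k] == '.' || seq[k] == '-') && !(PySem.Chars.islower seq[k]) &&
          ((if j < (seq.length : Int) then seq.getD j.toNat ' ' else '-') == '.' ||
           (if j < (seq.length : Int) then seq.getD j.toNat ' ' else '-') == '-')) := by
      intro j
      unfold pairBroken
      rw [if_neg (by push_cast; omega)]
      rw [Int.toNat_natCast, List.getD_eq_getElem seq ' ' hks]
      by_cases hg : (seq[k] == '.' || seq[k] == '-') = true
      · simp [hg]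
      · by_cases hl : PySem.Chars.islower seq[k] = true
        · simp [hg, hl]
        · simp [hg, hl]
    unfold projectCol
    simp only [zero_add]
    by_cases hg : (seq[k] == '.' || seq[k] == '-') = true
    · have hany : ((findPairs ssl).items.any
          (fun e => pairBroken seq (min seq.length ssl.length) e.1 e.2 && (e.1.toNat == k))) = false := by
        rw [Bool.eq_false_iff]
        intro hcon
        obtain ⟨j, _, hb⟩ := (pvAny_items_iff _ (pvFindPairs_good ssl) seq _ k).1 hcon
        rw [hbk j] at hb; simp [hg] at hb
      simp [hg, hany]
    · by_cases hl : PySem.Chars.islower seq[k] = true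
      · have hany : ((findPairs ssl).items.any
            (fun e => pairBroken seq (min seq.length ssl.length) e.1 e.2 && (e.1.toNat == k))) = false := by
          rw [Bool.eq_false_iff]
          intro hcon
          obtain ⟨j, _, hb⟩ := (pvAny_items_iff _ (pvFindPairs_good ssl) seq _ k).1 hcon
          rw [hbk j] at hb; simp [hl] at hb
        simp [hg, hl, hany]
      · rcases hget : (findPairs ssl).get? (k : Int) with _ | j
        · have hcont : (findPairs ssl).contains (k : Int) = false := by
            rw [PySem.Dict.contains_eq_isSome_get?, hget]; rfl
          have hany : ((findPairs ssl).items.any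
              (fun e => pairBroken seq (min seq.length ssl.length) e.1 e.2 && (e.1.toNat == k))) = false := by
            rw [Bool.eq_false_iff]
            intro hcon
            obtain ⟨j, hj, _⟩ := (pvAny_items_iff _ (pvFindPairs_good ssl) seq _ k).1 hcon
            rw [hget] at hj; simp at hj
          simp [hg, hl, hcont, hany]
        · have hcont : (findPairs ssl).contains (k : Int) = true := by
            rw [PySem.Dict.contains_eq_isSome_get?, hget]; rfl
          have hgd : (findPairs ssl).getD (k : Int) 0 = j := by
            rw [PySem.Dict.getD_eq_get?_getD, hget]; rfl
          by_cases hb : ((if j < (seq.length : Int) then seq.getD j.toNat ' ' else '-') == '.' ||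
              (if j < (seq.length : Int) then seq.getD j.toNat ' ' else '-') == '-') = true
          · have hany : ((findPairs ssl).items.any
                (fun e => pairBroken seq (min seq.length ssl.length) e.1 e.2 && (e.1.toNat == k))) = true := by
              rw [pvAny_items_iff _ (pvFindPairs_good ssl) seq _ k]
              exact ⟨j, hget, by rw [hbk j, hb]; simp [hg, hl]⟩
            conv_lhs => rw [if_neg hg, if_neg hl, if_pos hcont, hgd, if_pos hb]
            rw [if_pos hany]
          · have hany : ((findPairs ssl).items.any
                (fun e => pairBroken seq (min seq.length ssl.length) e.1 e.2 && (e.1.toNat == k))) = false := by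
              rw [Bool.eq_false_iff]
              intro hcon
              obtain ⟨j', hj', hb'⟩ := (pvAny_items_iff _ (pvFindPairs_good ssl) seq _ k).1 hcon
              rw [hget] at hj'
              cases hj'
              rw [hbk j] at hb'
              simp [hg, hl] at hb'
              simp [hb'] at hb
            conv_lhs => rw [if_neg hg, if_neg hl, if_pos hcont, hgd, if_neg hb]
            conv_rhs => rw [if_neg (by simp [hany] :
              ¬ ((findPairs ssl).items.any
                (fun e => pairBroken seq (min seq.length ssl.length) e.1 e.2 && (e.1.toNat == k))) = true),
              if_neg hg, if_neg hl]

-- ===== VERDICT (by name: the statement is the Claim_ definition above) =====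
theorem project_structure_aligned_spec : Claim_equal_project_structure_aligned := by
  intro a ss _
  show project_structure_aligned a ss = project_structure_aligned_alt a ss
  exact congrArg String.mk (pvMain a.toList (normalizeSS ss.toList))
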